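-- pv_equiv track=rewrite | github.com/ehsanshahkakarh/primer_project | 16S_subset/src/extract_target_sequences.py | find_sequences_for_taxon
-- ===== SOURCE A (Python) =====
-- def find_sequences_for_taxon(taxon_name, all_genera, centroid_to_members, fasta_index):
--     """Find all sequence IDs for a given taxon based on genera list."""
--     genera_list = [g.strip() for g in all_genera.split(';') if g.strip()]
--     matching_ids = set()
--
--     # Search through FASTA index for matching genera in headers
--     for seq_id in fasta_index:
--         for genus in genera_list:
--             if genus in seq_id:
--                 matching_ids.add(seq_id)
--                 # Also add cluster members if this is a centroid
--                 if seq_id in centroid_to_members: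
--                     matching_ids.update(centroid_to_members[seq_id])
--                 break
--
--     return matching_ids
-- ===== SOURCE B (Python) =====
-- def find_sequences_for_taxon(taxon_name, all_genera, centroid_to_members, fasta_index):
--     """Length-windowed hash-set matcher: instead of running a substring search for
--     every genus in every header, build a hash set of the genera once, take the set
--     of distinct genus lengths, and for each header slide a window of each such
--     length across it, testing the window by O(1) set membership.  A header matches
--     iff some window equals some genus, which is exactly 'some genus occurs in it'."""
--     genera = {g.strip() for g in all_genera.split(';') if g.strip()}
--     lengths = sorted({len(g) for g in genera})
--     out = set()
--     for s in fasta_index: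
--         if any(s[i:i + L] in genera
--                for L in lengths
--                for i in range(len(s) - L + 1)):
--             out.add(s)
--             out.update(centroid_to_members.get(s, ()))
--     return out
-- ===== Notes on version B (the rewrite author's own statement) =====
-- stated objective: alternative
-- what changed: B replaces A's per-genus substring search inside each header by a window scan: the genera go into a hash set once, and each header is scanned by sliding windows of the distinct genus lengths, testing each window by O(1) set membership; no per-genus scan of the header remains.
import Mathlib
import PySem

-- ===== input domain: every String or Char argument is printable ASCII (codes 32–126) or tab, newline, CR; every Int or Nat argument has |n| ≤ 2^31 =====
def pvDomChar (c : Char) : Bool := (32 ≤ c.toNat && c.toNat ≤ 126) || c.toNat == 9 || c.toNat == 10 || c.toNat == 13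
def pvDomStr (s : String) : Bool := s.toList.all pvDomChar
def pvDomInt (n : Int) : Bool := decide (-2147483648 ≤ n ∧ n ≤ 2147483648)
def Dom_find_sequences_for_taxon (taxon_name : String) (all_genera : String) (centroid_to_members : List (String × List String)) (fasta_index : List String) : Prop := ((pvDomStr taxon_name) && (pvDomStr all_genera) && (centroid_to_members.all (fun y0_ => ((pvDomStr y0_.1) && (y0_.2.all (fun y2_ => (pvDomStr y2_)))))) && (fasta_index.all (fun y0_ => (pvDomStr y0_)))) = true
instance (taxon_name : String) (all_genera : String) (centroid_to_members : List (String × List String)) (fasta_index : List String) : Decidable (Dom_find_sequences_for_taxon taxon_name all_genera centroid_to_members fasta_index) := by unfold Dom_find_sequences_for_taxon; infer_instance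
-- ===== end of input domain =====

-- B: instead of A's per-genus substring search in each header, B puts the genera in a set and slides windows of the distinct genus lengths across each header, testing each window by set membership (alternative algorithm, same results).


-- ===== PORT A =====
-- inner 'for genus in genera_list' loop with break (first matching genus adds seq_id and members, then break)
def pvInnerA (cmap : PySem.Dict String (List String)) (seq_id : String) (acc : PySem.Set String) : List String → PySem.Set String
  | [] => acc
  | genus :: rest =>
    if PySem.Str.isIn genus seq_id then
      let acc1 := PySem.Set.add acc seq_id
      if cmap.contains seq_id then PySem.Set.update acc1 (cmap.getD seq_id []) else acc1
    else pvInnerA cmap seq_id acc rest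

def find_sequences_for_taxon (taxon_name : String) (all_genera : String) (centroid_to_members : List (String × List String)) (fasta_index : List String) : List String :=
  let genera_list := (((PySem.Str.split? all_genera ";").getD []).map PySem.Str.strip).filter (fun g => g ≠ "")
  let cmap := PySem.Dict.mk centroid_to_members
  fasta_index.foldl (fun acc seq_id => pvInnerA cmap seq_id acc genera_list) PySem.Set.empty

-- ===== PORT B =====
-- 'any(s[i:i+L] in genera for L in lengths for i in range(len(s) - L + 1))'
def pvWindowHit (genera : PySem.Set String) (lengths : List Int) (s : String) : Bool :=
  lengths.any (fun L =>
    (PySem.List.pyRange 0 (PySem.Str.len s - L + 1) 1).any (fun i =>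
      PySem.Set.contains genera (PySem.Str.slice s (some i) (some (i + L)))))

def find_sequences_for_taxon_alt (taxon_name : String) (all_genera : String) (centroid_to_members : List (String × List String)) (fasta_index : List String) : List String :=
  let genera : PySem.Set String := PySem.Set.ofList ((((PySem.Str.split? all_genera ";").getD []).map PySem.Str.strip).filter (fun g => g ≠ ""))
  let lengths := PySem.List.sorted (PySem.Set.ofList (genera.map PySem.Str.len)) id
  let cmap := PySem.Dict.mk centroid_to_members
  fasta_index.foldl (fun out s =>
    if pvWindowHit genera lengths s then PySem.Set.update (PySem.Set.add out s) (cmap.getD s []) else out) PySem.Set.empty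

-- ===== PRECONDITION & SPEC =====
def Spec_find_sequences_for_taxon (taxon_name : String) (all_genera : String) (centroid_to_members : List (String × List String)) (fasta_index : List String) (out : List String) : Prop := out = find_sequences_for_taxon_alt taxon_name all_genera centroid_to_members fasta_index
instance (taxon_name : String) (all_genera : String) (centroid_to_members : List (String × List String)) (fasta_index : List String) (out : List String) : Decidable (Spec_find_sequences_for_taxon taxon_name all_genera centroid_to_members fasta_index out) := by unfold Spec_find_sequences_for_taxon; infer_instance

-- ===== CLAIM (what is proved, stated in full; the proofs are below) =====
def Claim_equal_find_sequences_for_taxon : Prop := ∀ (taxon_name : String) (all_genera : String) (centroid_to_members : List (String × List String)) (fasta_index : List String), Dom_find_sequences_for_taxon taxon_name all_genera centroid_to_members fasta_index → Spec_find_sequences_for_taxon taxon_name all_genera centroid_to_members fasta_index (find_sequences_for_taxon taxon_name all_genera centroid_to_members fasta_index)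

-- ===== LEMMAS AND PROOFS =====

-- A's break-loop over genera either leaves acc unchanged (no genus matches) or performs add+update once
theorem pvInnerA_eq (cmap : PySem.Dict String (List String)) (seq_id : String) (acc : PySem.Set String) (genera : List String) :
    pvInnerA cmap seq_id acc genera =
      if genera.any (fun g => PySem.Str.isIn g seq_id) then
        PySem.Set.update (PySem.Set.add acc seq_id) (cmap.getD seq_id [])
      else acc := by
  induction genera with
  | nil => simp [pvInnerA]
  | cons g rest ih =>
    cases hb : PySem.Str.isIn g seq_id with
    | true =>
      simp only [pvInnerA, hb, List.any_cons, Bool.true_or, if_true]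
      cases hc : cmap.contains seq_id with
      | true => simp
      | false =>
        rw [PySem.Dict.getD_of_not_contains _ _ hc]
        simp [PySem.Set.update_nil]
    | false =>
      simp only [pvInnerA, hb, List.any_cons, Bool.false_or]
      exact ih

-- the window scan over the distinct genus lengths finds exactly the headers containing some genus
theorem pvHit_eq (gl : List String) (s : String) :
    gl.any (fun g => PySem.Str.isIn g s)
      = pvWindowHit (PySem.Set.ofList gl)
          (PySem.List.sorted (PySem.Set.ofList ((PySem.Set.ofList gl).map PySem.Str.len)) id) s := by
  have hbridge : ∀ (a b : Option Int), (PySem.Str.slice s a b).toList = PySem.List.slice s.toList a b := by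
    intro a b; simp [PySem.Str.slice]
  rw [Bool.eq_iff_iff]
  simp only [pvWindowHit, List.any_eq_true]
  constructor
  · rintro ⟨g, hg, hin⟩
    obtain ⟨t, u, hs⟩ := (PySem.Str.isIn_iff_infix g s).mp hin
    have hlen : s.toList.length = t.length + g.toList.length + u.length := by
      rw [← hs]; simp [List.length_append]; omega
    refine ⟨PySem.Str.len g, ?_, (t.length : Int), ?_, ?_⟩
    · rw [(PySem.List.sorted_perm _ _ _).mem_iff, PySem.Set.mem_ofList]
      exact List.mem_map_of_mem ((PySem.Set.mem_ofList _ _).mpr hg)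
    · rw [PySem.List.mem_pyRange_one]
      refine ⟨Int.natCast_nonneg _, ?_⟩
      rw [PySem.Str.len_eq, PySem.Str.len_eq, hlen]; push_cast; omega
    · have hsl : PySem.Str.slice s (some (t.length : Int)) (some ((t.length : Int) + PySem.Str.len g)) = g := by
        apply String.toList_inj.mp
        rw [hbridge, PySem.Str.len_eq, PySem.List.slice_natCast_add, ← hs, List.append_assoc,
          List.drop_left, List.take_left]
      rw [hsl, PySem.Set.contains_iff]
      exact (PySem.Set.mem_ofList _ _).mpr hg
  · rintro ⟨L, hL, i, hi, hc⟩
    have hL0 : 0 ≤ L := by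
      rw [(PySem.List.sorted_perm _ _ _).mem_iff, PySem.Set.mem_ofList, List.mem_map] at hL
      obtain ⟨g0, _, rfl⟩ := hL
      rw [PySem.Str.len_eq]; exact Int.natCast_nonneg _
    rw [PySem.List.mem_pyRange_one] at hi
    refine ⟨PySem.Str.slice s (some i) (some (i + L)), ?_, ?_⟩
    · exact (PySem.Set.mem_ofList _ _).mp ((PySem.Set.contains_iff _ _).mp hc)
    · rw [PySem.Str.isIn_iff_infix, hbridge, PySem.List.slice_toNat _ hi.1 (by omega)]
      exact (List.take_prefix _ _).isInfix.trans (List.drop_suffix _ _).isInfix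

-- ===== VERDICT (by name: the statement is the Claim_ definition above) =====
theorem find_sequences_for_taxon_spec : Claim_equal_find_sequences_for_taxon := by
  intro taxon_name all_genera centroid_to_members fasta_index _
  unfold Spec_find_sequences_for_taxon find_sequences_for_taxon find_sequences_for_taxon_alt
  apply PySem.List.foldl_congr_mem
  intro acc s _
  rw [pvInnerA_eq, pvHit_eq]
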